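-- pv_equiv track=rewrite | github.com/bc36/leetcode | Python/lc2600_2699.py | minReverseOperations
-- ===== SOURCE A (Python) =====
-- import bisect, collections, functools, heapq, itertools, math, operator, string
-- from typing import List, Optional, Tuple
--
-- def minReverseOperations(
--     n: int, p: int, banned: List[int], k: int
-- ) -> List[int]:
--     s = set(banned) | {p}
--     not_banned = [[], []]
--     for i in range(n):
--         if i not in s:
--             not_banned[i % 2].append(i)
--     not_banned[0].append(n)
--     not_banned[1].append(n)  # 哨兵
--
--     fa = [list(range(len(not_banned[0]))), list(range(len(not_banned[1])))]
--
--     def find(i: int, x: int) -> int: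
--         f = fa[i]
--         if f[x] != x:
--             f[x] = find(i, f[x])
--         return f[x]
--
--     def merge(i: int, from_: int, to: int) -> None:
--         x, y = find(i, from_), find(i, to)
--         fa[i][x] = y
--
--     ans = [-1] * n
--     q = [p]
--     step = 0
--     while q:
--         tmp = q
--         q = []
--         for i in tmp:
--             ans[i] = step
--             # 从 mn 到 mx 的所有位置都可以翻转到
--             mn = max(i - k + 1, k - i - 1)
--             mx = min(i + k - 1, n * 2 - k - i - 1)
--             a = not_banned[mn % 2]
--             j = find(mn % 2, bisect.bisect_left(a, mn))
--             while a[j] <= mx: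
--                 q.append(a[j])
--                 merge(mn % 2, j, j + 1)  # 删除 j
--                 j = find(mn % 2, j + 1)
--         step += 1
--     return ans
-- ===== SOURCE B (Python) =====
-- from typing import List
--
-- def minReverseOperations(
--     n: int, p: int, banned: List[int], k: int
-- ) -> List[int]:
--     # BFS marking a visited set and scanning each reachable window directly.
--     visited = set(banned)
--     visited.add(p)
--     ans = [-1] * n
--     ans[p] = 0
--     q = [p]
--     step = 0
--     while q:
--         step += 1
--         nxt = []
--         for i in q:
--             mn = max(i - k + 1, k - i - 1)
--             mx = min(i + k - 1, 2 * n - k - i - 1)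
--             for j in range(mn, mx + 1, 2):
--                 if j not in visited:
--                     visited.add(j)
--                     ans[j] = step
--                     nxt.append(j)
--         q = nxt
--     return ans
-- ===== Notes on version B (the rewrite author's own statement) =====
-- stated objective: simpler
-- what changed: Replaces the union-find skip structure over two sorted not-banned position lists (bisect + path-compressed next-pointer deletion) by a direct BFS that scans each reachable window range(mn, mx+1, 2) and marks a visited set, which is shorter and needs no auxiliary index structures.
import Mathlib
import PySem

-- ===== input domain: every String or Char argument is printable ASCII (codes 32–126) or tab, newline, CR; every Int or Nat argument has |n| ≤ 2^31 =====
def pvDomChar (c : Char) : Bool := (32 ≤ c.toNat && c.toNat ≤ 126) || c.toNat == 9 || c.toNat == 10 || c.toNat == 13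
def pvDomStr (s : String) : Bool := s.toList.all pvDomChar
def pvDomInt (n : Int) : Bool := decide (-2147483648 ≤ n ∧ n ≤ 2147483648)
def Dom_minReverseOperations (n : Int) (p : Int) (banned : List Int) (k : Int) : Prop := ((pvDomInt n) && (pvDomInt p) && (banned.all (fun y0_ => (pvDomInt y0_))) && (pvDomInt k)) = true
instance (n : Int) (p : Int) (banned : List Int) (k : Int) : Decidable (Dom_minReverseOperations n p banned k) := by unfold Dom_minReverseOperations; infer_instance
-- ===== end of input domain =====

-- ===== PORT A =====
-- B replaces A's union-find skip structure over sorted not-banned lists by a plain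
-- visited-set BFS scanning each window directly (simpler; not claimed faster).

-- exact port of bisect.bisect_left on the sorted lists A builds
def pvBisectLeft (a : List Int) (x : Int) : Nat := (a.takeWhile (fun v => decide (v < x))).length

-- find(i, x) with path compression; fuel only makes the recursion structural,
-- it never runs out on admitted inputs (chain indices strictly increase)
def pvFind (fa : List Int) (x : Nat) : Nat → List Int × Nat
  | 0 => (fa, x)
  | fuel+1 =>
    let fx := (fa.getD x 0).toNat
    if fx ≠ x then
      let r := pvFind fa fx fuel
      (r.1.set x (r.2 : Int), r.2)
    else (fa, x)

-- merge(i, from_, to): x, y = find(from_), find(to); fa[x] = y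
def pvMerge (fa : List Int) (src dst : Nat) : List Int :=
  let r1 := pvFind fa src fa.length
  let r2 := pvFind r1.1 dst r1.1.length
  r2.1.set r1.2 (r2.2 : Int)

-- the inner `while a[j] <= mx` loop; fuel = len(a) suffices (each pass deletes an index)
def pvInner (a : List Int) (mx : Int) (fa : List Int) (j : Nat) (q : List Int) : Nat → List Int × List Int
  | 0 => (fa, q)
  | fuel+1 =>
    if a.getD j 0 ≤ mx then
      let q' := q ++ [a.getD j 0]
      let fa' := pvMerge fa j (j+1)
      let r := pvFind fa' (j+1) fa'.length
      pvInner a mx r.1 r.2 q' fuel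
    else (fa, q)

structure PvA where
  fa0 : List Int
  fa1 : List Int
  ans : List Int
  q : List Int

-- the body of `for i in tmp`
def pvProcA (n k step : Int) (a0 a1 : List Int) (s : PvA) (i : Int) : PvA :=
  let ans' := PySem.List.pySetD s.ans i step
  let mn := max (i - k + 1) (k - i - 1)
  let mx := min (i + k - 1) (n * 2 - k - i - 1)
  if PySem.Int.mod mn 2 = 0 then
    let r0 := pvFind s.fa0 (pvBisectLeft a0 mn) s.fa0.length
    let r := pvInner a0 mx r0.1 r0.2 s.q a0.length
    ⟨r.1, s.fa1, ans', r.2⟩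
  else
    let r0 := pvFind s.fa1 (pvBisectLeft a1 mn) s.fa1.length
    let r := pvInner a1 mx r0.1 r0.2 s.q a1.length
    ⟨s.fa0, r.1, ans', r.2⟩

-- `while q:` — fuel n+1 never runs out on admitted inputs (levels strictly shrink a measure)
def pvLoopA (n k : Int) (a0 a1 : List Int) : Nat → PvA → Int → List Int
  | 0, s, _ => s.ans
  | fuel+1, s, step =>
    if s.q.isEmpty then s.ans
    else pvLoopA n k a0 a1 fuel (s.q.foldl (pvProcA n k step a0 a1) { s with q := [] }) (step + 1)

def minReverseOperations (n : Int) (p : Int) (banned : List Int) (k : Int) : List Int :=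
  let s := PySem.Set.add (PySem.Set.ofList banned) p
  let nb := (PySem.List.pyRange 0 n 1).foldl
    (fun (nb : List Int × List Int) i =>
      if i ∈ s then nb
      else if PySem.Int.mod i 2 = 0 then (nb.1 ++ [i], nb.2) else (nb.1, nb.2 ++ [i]))
    ([], [])
  let a0 := nb.1 ++ [n]
  let a1 := nb.2 ++ [n]
  pvLoopA n k a0 a1 (n.toNat + 1)
    ⟨(List.range a0.length).map (Int.ofNat ·), (List.range a1.length).map (Int.ofNat ·),
     List.replicate n.toNat (-1), [p]⟩ 0

-- ===== PORT B =====
structure PvB where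
  visited : List Int
  ans : List Int
  q : List Int

-- body of `for i in q`: scan the window directly
def pvProcB (n k step : Int) (s : PvB) (i : Int) : PvB :=
  let mn := max (i - k + 1) (k - i - 1)
  let mx := min (i + k - 1) (2 * n - k - i - 1)
  (PySem.List.pyRange mn (mx + 1) 2).foldl
    (fun (t : PvB) j =>
      if j ∈ t.visited then t
      else ⟨PySem.Set.add t.visited j, PySem.List.pySetD t.ans j step, t.q ++ [j]⟩)
    s

def pvLoopB (n k : Int) : Nat → PvB → Int → List Int
  | 0, s, _ => s.ans
  | fuel+1, s, step =>
    if s.q.isEmpty then s.ans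
    else pvLoopB n k fuel (s.q.foldl (pvProcB n k (step + 1)) { s with q := [] }) (step + 1)

def minReverseOperations_alt (n : Int) (p : Int) (banned : List Int) (k : Int) : List Int :=
  let visited := PySem.Set.add (PySem.Set.ofList banned) p
  pvLoopB n k (n.toNat + 1) ⟨visited, PySem.List.pySetD (List.replicate n.toNat (-1)) p 0, [p]⟩ 0

-- ===== PRECONDITION & SPEC =====
-- Pre_ is exactly the set of inputs on which A returns normally: ans[p] must be a valid
-- (possibly negative, Python-wraparound) index, and the first bisect position must stay inside
-- the parity list (max(p-k+1, k-p-1) ≤ n); everywhere else A raises IndexError.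
def Pre_minReverseOperations (n : Int) (p : Int) (banned : List Int) (k : Int) : Prop :=
  1 ≤ n ∧ -n ≤ p ∧ p < n ∧ max (p - k + 1) (k - p - 1) ≤ n
instance (n : Int) (p : Int) (banned : List Int) (k : Int) : Decidable (Pre_minReverseOperations n p banned k) := by unfold Pre_minReverseOperations; infer_instance
def pvWitness_minReverseOperations : Int × Int × List Int × Int := (4, 0, [1], 4)

def Spec_minReverseOperations (n : Int) (p : Int) (banned : List Int) (k : Int) (out : List Int) : Prop := out = minReverseOperations_alt n p banned k
instance (n : Int) (p : Int) (banned : List Int) (k : Int) (out : List Int) : Decidable (Spec_minReverseOperations n p banned k out) := by unfold Spec_minReverseOperations; infer_instance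

-- ===== CLAIM (what is proved, stated in full; the proofs are below) =====
def Claim_equal_minReverseOperations : Prop := ∀ (n : Int) (p : Int) (banned : List Int) (k : Int), Dom_minReverseOperations n p banned k → Pre_minReverseOperations n p banned k → Spec_minReverseOperations n p banned k (minReverseOperations n p banned k)

-- ===== LEMMAS AND PROOFS =====

-- -------- generic utilities --------

theorem pvGetD_set_eq (l : List Int) (i : Nat) (v d : Int) (h : i < l.length) :
    (l.set i v).getD i d = v := by
  simp [List.getD_eq_getElem?_getD, List.getElem?_set_self, h]

theorem pvGetD_set_ne (l : List Int) (i j : Nat) (v d : Int) (h : j ≠ i) :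
    (l.set i v).getD j d = l.getD j d := by
  simp [List.getD_eq_getElem?_getD, List.getElem?_set_ne (by omega : i ≠ j)]

theorem pvGetD_eq_getElem (l : List Int) (i : Nat) (d : Int) (h : i < l.length) :
    l.getD i d = l[i] := by
  simp [List.getD_eq_getElem?_getD, List.getElem?_eq_getElem h]

-- two strictly increasing lists with the same members are equal
theorem pvSortedExt : ∀ (l₁ l₂ : List Int), l₁.Pairwise (· < ·) → l₂.Pairwise (· < ·) →
    (∀ v, v ∈ l₁ ↔ v ∈ l₂) → l₁ = l₂
  | [], [], _, _, _ => rfl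
  | [], y :: l₂, _, _, hm => absurd ((hm y).2 (.head _)) (by simp)
  | x :: l₁, [], _, _, hm => absurd ((hm x).1 (.head _)) (by simp)
  | x :: l₁, y :: l₂, h₁, h₂, hm => by
    rcases List.pairwise_cons.1 h₁ with ⟨hx, h₁'⟩
    rcases List.pairwise_cons.1 h₂ with ⟨hy, h₂'⟩
    have hxy : x = y := by
      have h1 := (hm x).1 (.head _)
      have h2 := (hm y).2 (.head _)
      rcases List.mem_cons.1 h1 with h | h
      · exact h
      · rcases List.mem_cons.1 h2 with h' | h'
        · omega
        · have := hx _ h'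
          have := hy _ h
          omega
    subst hxy
    have : l₁ = l₂ := pvSortedExt l₁ l₂ h₁' h₂' (fun v => by
      constructor
      · intro hv
        rcases List.mem_cons.1 ((hm v).1 (.tail _ hv)) with h | h
        · exact absurd hv (by subst h; intro hc; exact absurd (hx _ hc) (lt_irrefl _))
        · exact h
      · intro hv
        rcases List.mem_cons.1 ((hm v).2 (.tail _ hv)) with h | h
        · exact absurd hv (by subst h; intro hc; exact absurd (hy _ hc) (lt_irrefl _))
        · exact h)
    rw [this]

-- countP splits along a pointwise disjoint disjunction
theorem pvCountPSplit (P Q R : Int → Bool) : ∀ (l : List Int),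
    (∀ z ∈ l, P z = (Q z || R z) ∧ ¬(Q z = true ∧ R z = true)) →
    l.countP P = l.countP Q + l.countP R
  | [], _ => rfl
  | x :: l, h => by
    have hx := h x (.head _)
    have hl := pvCountPSplit P Q R l (fun z hz => h z (.tail _ hz))
    simp only [List.countP_cons, hl]
    rcases hx with ⟨h1, h2⟩
    cases hq : Q x <;> cases hr : R x <;> simp [hq, hr] at h1 h2 ⊢ <;> simp [h1] <;> omega

-- spec of takeWhile as used by bisect_left
theorem pvTakeWhileSpec (p : Int → Bool) : ∀ (l : List Int),
    (∀ i, i < (l.takeWhile p).length → p (l.getD i 0) = true) ∧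
    ((l.takeWhile p).length < l.length → p (l.getD (l.takeWhile p).length 0) = false)
  | [] => by simp
  | x :: l => by
    rcases pvTakeWhileSpec p l with ⟨h1, h2⟩
    cases hp : p x
    · simp only [List.takeWhile_cons, hp]
      exact ⟨fun i hi => by simp at hi, fun _ => by simpa using hp⟩
    · simp only [List.takeWhile_cons, hp]
      constructor
      · intro i hi
        cases i with
        | zero => simpa using hp
        | succ j => exact h1 j (by simpa using hi)
      · intro h
        exact h2 (by simpa using h)

-- -------- next live index --------

def pvNxt (L : Nat → Bool) (last : Nat) (x : Nat) : Nat :=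
  if h : x < last then (if L x then x else pvNxt L last (x + 1)) else last
termination_by last - x
decreasing_by omega

theorem pvNxt_ge (L : Nat → Bool) (last x : Nat) (hx : x ≤ last) : x ≤ pvNxt L last x := by
  fun_induction pvNxt L last x with
  | case1 x h hL => omega
  | case2 x h hL ih => have := ih (by omega); omega
  | case3 x h => omega

theorem pvNxt_le (L : Nat → Bool) (last x : Nat) : pvNxt L last x ≤ last := by
  fun_induction pvNxt L last x with
  | case1 x h hL => omega
  | case2 x h hL ih => exact ih
  | case3 x h => omega

theorem pvNxt_live (L : Nat → Bool) (last x : Nat) (hL : L last = true) :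
    L (pvNxt L last x) = true := by
  fun_induction pvNxt L last x with
  | case1 x h hLx => exact hLx
  | case2 x h hLx ih => exact ih
  | case3 x h => exact hL

theorem pvNxt_dead (L : Nat → Bool) (last x : Nat) :
    ∀ y, x ≤ y → y < pvNxt L last x → L y = false := by
  fun_induction pvNxt L last x with
  | case1 x h hLx => omega
  | case2 x h hLx ih =>
    intro y hy1 hy2
    rcases Nat.eq_or_lt_of_le hy1 with h' | h'
    · subst h'; simpa using hLx
    · exact ih y h' hy2
  | case3 x h => omega

theorem pvNxt_self (L : Nat → Bool) (last x : Nat) (hx : x ≤ last) (hLx : L x = true) :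
    pvNxt L last x = x := by
  rw [pvNxt]
  by_cases h : x < last
  · simp [h, hLx]
  · simp [h]; omega

theorem pvNxt_eq_iff (L : Nat → Bool) (last x z : Nat) (hL : L last = true) (hx : x ≤ last) :
    pvNxt L last x = z ↔
      (x ≤ z ∧ z ≤ last ∧ L z = true ∧ ∀ w, x ≤ w → w < z → L w = false) := by
  constructor
  · rintro rfl
    exact ⟨pvNxt_ge L last x hx, pvNxt_le L last x, pvNxt_live L last x hL,
      pvNxt_dead L last x⟩
  · rintro ⟨h1, h2, h3, h4⟩
    have g1 := pvNxt_ge L last x hx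
    have g2 := pvNxt_le L last x
    have g3 := pvNxt_live L last x hL
    have g4 := pvNxt_dead L last x
    rcases Nat.lt_trichotomy (pvNxt L last x) z with h | h | h
    · have := h4 _ g1 h; rw [g3] at this; exact absurd this (by simp)
    · exact h
    · have := g4 _ h1 h; rw [h3] at this; exact absurd this (by simp)

theorem pvNxt_collapse (L : Nat → Bool) (last x y : Nat) (hL : L last = true) (hx : x ≤ last)
    (hxy : x ≤ y) (hy : y ≤ pvNxt L last x) : pvNxt L last y = pvNxt L last x := by
  have hyl : y ≤ last := le_trans hy (pvNxt_le L last x)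
  rw [pvNxt_eq_iff L last y _ hL hyl]
  exact ⟨hy, pvNxt_le L last x, pvNxt_live L last x hL,
    fun w hw1 hw2 => pvNxt_dead L last x w (le_trans hxy hw1) hw2⟩

theorem pvNxt_del (L : Nat → Bool) (last j x : Nat) (hL : L last = true) (hj : j < last)
    (hx : x ≤ last) :
    pvNxt (fun z => decide (z ≠ j) && L z) last x =
      if pvNxt L last x = j then pvNxt L last (j + 1) else pvNxt L last x := by
  have hL' : (fun z => decide (z ≠ j) && L z) last = true := by
    simp [hL]; omega
  by_cases h : pvNxt L last x = j
  · rw [if_pos h]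
    rw [pvNxt_eq_iff _ last x _ hL' hx]
    have g1 := pvNxt_ge L last (j + 1) (by omega)
    have g2 := pvNxt_le L last (j + 1)
    have g3 := pvNxt_live L last (j + 1) hL
    refine ⟨?_, g2, ?_, ?_⟩
    · have := pvNxt_ge L last x hx; omega
    · simp [g3]; omega
    · intro w hw1 hw2
      rcases Nat.lt_trichotomy w j with hwj | hwj | hwj
      · have := pvNxt_dead L last x w hw1 (by omega); simp [this]
      · subst hwj; simp
      · have := pvNxt_dead L last (j + 1) w (by omega) hw2; simp [this]
  · rw [if_neg h]
    rw [pvNxt_eq_iff _ last x _ hL' hx]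
    refine ⟨pvNxt_ge L last x hx, pvNxt_le L last x, ?_, ?_⟩
    · simp [pvNxt_live L last x hL]; omega
    · intro w hw1 hw2
      have := pvNxt_dead L last x w hw1 hw2; simp [this]

-- -------- the union-find invariant --------

def InvUF (a fa : List Int) (L : Nat → Bool) : Prop :=
  fa.length = a.length ∧ 1 ≤ a.length ∧ L (a.length - 1) = true ∧
  ∀ x, x < a.length →
    (x : Int) ≤ fa.getD x 0 ∧ (fa.getD x 0).toNat ≤ pvNxt L (a.length - 1) x ∧
    (fa.getD x 0 = (x : Int) → L x = true)

theorem pvFind_spec (a : List Int) (L : Nat → Bool) :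
    ∀ (fuel : Nat) (fa : List Int) (x : Nat), InvUF a fa L → x ≤ a.length - 1 →
      a.length - x ≤ fuel →
      (pvFind fa x fuel).2 = pvNxt L (a.length - 1) x ∧ InvUF a (pvFind fa x fuel).1 L := by
  intro fuel
  induction fuel with
  | zero =>
    intro fa x hInv hx hfuel
    rcases hInv with ⟨h1, h2, _⟩
    omega
  | succ fuel ih =>
    intro fa x hInv hx hfuel
    have hInv' := hInv
    rcases hInv' with ⟨hlen, hpos, hlast, hent⟩
    have hxlen : x < a.length := by omega
    rcases hent x hxlen with ⟨he1, he2, he3⟩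
    by_cases hfx : (fa.getD x 0).toNat = x
    · have hfx' : fa.getD x 0 = (x : Int) := by omega
      have hLx : L x = true := he3 hfx'
      have hnx : pvNxt L (a.length - 1) x = x := pvNxt_self L _ x hx hLx
      simp only [pvFind, hfx, ne_eq, not_true_eq_false, if_neg, ite_false]
      simp [hnx, hInv]
    · simp only [pvFind, hfx, ne_eq, not_false_eq_true, if_pos, ite_true]
      set fx := (fa.getD x 0).toNat with hfxdef
      have hxfx : x < fx := by omega
      have hfxle : fx ≤ pvNxt L (a.length - 1) x := he2
      have hfxlast : fx ≤ a.length - 1 := le_trans hfxle (pvNxt_le L _ x)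
      have hrec := ih fa fx hInv hfxlast (by omega)
      rcases hrec with ⟨hr2, hrInv⟩
      have hnxt : pvNxt L (a.length - 1) fx = pvNxt L (a.length - 1) x :=
        pvNxt_collapse L _ x fx hlast hx (by omega) hfxle
    -- result: set x to the root
      rcases hrInv with ⟨hlen', hpos', hlast', hent'⟩
      refine ⟨by simp [hr2, hnxt], ?_, ?_, ?_, ?_⟩
      · simp [hlen']
      · exact hpos'
      · exact hlast'
      · intro y hy
        by_cases hyx : y = x
        · subst hyx
          rw [pvGetD_set_eq _ _ _ _ (by omega)]
          rw [hr2, hnxt]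
          have hge := pvNxt_ge L (a.length - 1) y hx
          refine ⟨by omega, by simp, ?_⟩
          intro hroot
          have : pvNxt L (a.length - 1) y = y := by omega
          by_cases hLy : L y = true
          · exact hLy
          · exfalso
            have hydead : L y = false := by simpa using hLy
            have : y < a.length - 1 ∨ y = a.length - 1 := by omega
            rcases this with h | h
            · have hnd := pvNxt_dead L (a.length - 1) y y (le_refl _)
              have hge2 := pvNxt_ge L (a.length - 1) (y + 1) (by omega)
              rw [pvNxt] at this
              simp [h, hydead] at this
              omega
            · rw [h] at hydead; rw [hlast] at hydead; simp at hydead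
        · rw [pvGetD_set_ne _ _ _ _ _ hyx]
          exact hent' y hy


theorem pvMerge_spec (a fa : List Int) (L : Nat → Bool) (j : Nat)
    (hInv : InvUF a fa L) (hLj : L j = true) (hj : j < a.length - 1) :
    InvUF a (pvMerge fa j (j + 1)) (fun z => decide (z ≠ j) && L z) := by
  have hInv0 := hInv
  rcases hInv0 with ⟨hlen, hpos, hlast, _⟩
  have h1 := pvFind_spec a L fa.length fa j hInv (by omega) (by omega)
  rcases h1 with ⟨h12, h1Inv⟩
  have hj0 : pvNxt L (a.length - 1) j = j := pvNxt_self L _ j (by omega) hLj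
  have h1len : (pvFind fa j fa.length).1.length = a.length := h1Inv.1
  have h2 := pvFind_spec a L (pvFind fa j fa.length).1.length (pvFind fa j fa.length).1 (j + 1)
    h1Inv (by omega) (by omega)
  rcases h2 with ⟨h22, h2Inv⟩
  set fa2 := (pvFind (pvFind fa j fa.length).1 (j + 1) (pvFind fa j fa.length).1.length).1 with hfa2
  set y := pvNxt L (a.length - 1) (j + 1) with hy
  have hyge : j + 1 ≤ y := pvNxt_ge L _ (j + 1) (by omega)
  have hyle : y ≤ a.length - 1 := pvNxt_le L _ (j + 1)
  rcases h2Inv with ⟨hlen2, hpos2, hlast2, hent2⟩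
  have hL'last : (fun z => decide (z ≠ j) && L z) (a.length - 1) = true := by
    simp [hlast]; omega
  simp only [pvMerge]
  rw [h12, hj0, h22, ← hfa2]
  refine ⟨by simp [hlen2], hpos, hL'last, ?_⟩
  intro x hx
  have hxlast : x ≤ a.length - 1 := by omega
  have hdel := pvNxt_del L (a.length - 1) j x hlast hj hxlast
  by_cases hxj : x = j
  · subst hxj
    rw [pvGetD_set_eq _ _ _ _ (by omega)]
    rw [hdel, hj0, if_pos rfl]
    refine ⟨by omega, by simp [← hy], ?_⟩
    intro habs
    exfalso; omega
  · rw [pvGetD_set_ne _ _ _ _ _ hxj]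
    rcases hent2 x hx with ⟨e1, e2, e3⟩
    refine ⟨e1, ?_, ?_⟩
    · rw [hdel]
      by_cases hc : pvNxt L (a.length - 1) x = j
      · rw [if_pos hc]; rw [hc] at e2; omega
      · rw [if_neg hc]; exact e2
    · intro hroot
      simp [hxj, e3 hroot]

def pvWIdx (a : List Int) (L : Nat → Bool) (mx : Int) (j : Nat) : List Nat :=
  (List.range' j (a.length - j)).filter (fun idx => L idx && decide (a.getD idx 0 ≤ mx))

theorem pvRange'_split (s m t : Nat) (h : m ≤ t) :
    List.range' s t = List.range' s m ++ List.range' (s + m) (t - m) := by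
  have h2 : t = m + (t - m) := by omega
  rw [h2, ← List.range'_append]
  norm_num

theorem pvInner_spec (a : List Int) (n mx : Int)
    (hmono : ∀ i j : Nat, i < j → j < a.length → a.getD i 0 < a.getD j 0)
    (hn : a.getD (a.length - 1) 0 = n) (hmx : mx < n) :
    ∀ (fuel : Nat) (fa : List Int) (L : Nat → Bool) (j : Nat) (q : List Int),
      InvUF a fa L → L j = true → j ≤ a.length - 1 → a.length - j ≤ fuel →
      ∃ fa' L',
        pvInner a mx fa j q fuel = (fa', q ++ (pvWIdx a L mx j).map (fun idx => a.getD idx 0)) ∧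
        InvUF a fa' L' ∧
        (∀ z, L' z = (L z && decide (z ∉ pvWIdx a L mx j))) ∧
        (∀ idx ∈ pvWIdx a L mx j, L idx = true ∧ idx < a.length - 1) := by
  intro fuel
  induction fuel with
  | zero =>
    intro fa L j q hInv _ hj hfuel
    rcases hInv with ⟨_, hpos, _, _⟩
    omega
  | succ fuel ih =>
    intro fa L j q hInv hLj hj hfuel
    have hInv0 := hInv
    rcases hInv0 with ⟨hlen, hpos, hlast, _⟩
    by_cases he : a.getD j 0 ≤ mx
    · -- collect a[j], delete j, hop to the next live index, recurse
      have hjlast : j < a.length - 1 := by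
        rcases Nat.lt_or_ge j (a.length - 1) with h | h
        · exact h
        · exfalso
          have : j = a.length - 1 := by omega
          rw [this, hn] at he; omega
      have hMInv := pvMerge_spec a fa L j hInv hLj hjlast
      set L1 : Nat → Bool := fun z => decide (z ≠ j) && L z with hL1def
      have hM0 := hMInv
      rcases hM0 with ⟨hMlen, _, hL1last, _⟩
      have hF := pvFind_spec a L1 (pvMerge fa j (j + 1)).length (pvMerge fa j (j + 1)) (j + 1)
        hMInv (by omega) (by omega)
      rcases hF with ⟨hF2, hFInv⟩
      obtain ⟨j', hj'def⟩ : ∃ t, t = pvNxt L1 (a.length - 1) (j + 1) := ⟨_, rfl⟩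
      have hj'ge : j + 1 ≤ j' := by
        rw [hj'def]; exact pvNxt_ge L1 (a.length - 1) (j + 1) (by omega)
      have hj'le : j' ≤ a.length - 1 := by
        rw [hj'def]; exact pvNxt_le L1 (a.length - 1) (j + 1)
      have hLj' : L1 j' = true := by
        rw [hj'def]; exact pvNxt_live L1 (a.length - 1) (j + 1) hL1last
      have hfuel' : a.length - j' ≤ fuel := by omega
      have hrec := ih (pvFind (pvMerge fa j (j + 1)) (j + 1) (pvMerge fa j (j + 1)).length).1
        L1 j' (q ++ [a.getD j 0]) hFInv hLj' hj'le hfuel'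
      rcases hrec with ⟨fa4, L2, heq, hInv4, hchar, hmem⟩
      have hWsplit : pvWIdx a L mx j = j :: pvWIdx a L1 mx j' := by
        unfold pvWIdx
        have h1 : a.length - j = (a.length - j - 1) + 1 := by omega
        rw [h1, List.range'_succ]
        rw [List.filter_cons]
        simp only [hLj, he, decide_true, Bool.and_true, Bool.and_self, if_pos]
        congr 1
        have hcongr : (List.range' (j + 1) (a.length - j - 1)).filter
            (fun idx => L idx && decide (a.getD idx 0 ≤ mx)) =
            (List.range' (j + 1) (a.length - j - 1)).filter
            (fun idx => L1 idx && decide (a.getD idx 0 ≤ mx)) := by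
          apply List.filter_congr
          intro idx hidx
          rw [List.mem_range'_1] at hidx
          have : idx ≠ j := by omega
          simp [hL1def, this]
        rw [hcongr]
        rw [pvRange'_split (j + 1) (j' - (j + 1)) (a.length - j - 1) (by omega)]
        rw [List.filter_append]
        have hdead : (List.range' (j + 1) (j' - (j + 1))).filter
            (fun idx => L1 idx && decide (a.getD idx 0 ≤ mx)) = [] := by
          rw [List.filter_eq_nil_iff]
          intro idx hidx
          rw [List.mem_range'_1] at hidx
          have : L1 idx = false := pvNxt_dead L1 (a.length - 1) (j + 1) idx (by omega) (by omega)
          simp [this]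
        rw [hdead]
        simp only [List.nil_append]
        have : j + 1 + (j' - (j + 1)) = j' := by omega
        rw [this]
        have : a.length - j - 1 - (j' - (j + 1)) = a.length - j' := by omega
        rw [this]
      refine ⟨fa4, L2, ?_, hInv4, ?_, ?_⟩
      · simp only [pvInner]
        rw [if_pos he]
        rw [hF2, ← hj'def, heq, hWsplit]
        simp
        
      · intro z
        rw [hchar z, hWsplit]
        by_cases hzj : z = j
        · subst hzj
          simp [hL1def]
        · by_cases hzW : z ∈ pvWIdx a L1 mx j'
          · simp [hL1def, hzj, hzW]
          · simp [hL1def, hzj, hzW]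
      · intro idx hidx
        rw [hWsplit] at hidx
        rcases List.mem_cons.1 hidx with h | h
        · subst h; exact ⟨hLj, hjlast⟩
        · rcases hmem idx h with ⟨hL1idx, hlt⟩
          refine ⟨?_, hlt⟩
          rw [hL1def] at hL1idx
          simp at hL1idx
          exact hL1idx.2
    · -- a[j] > mx: the window is exhausted
      have hWnil : pvWIdx a L mx j = [] := by
        unfold pvWIdx
        rw [List.filter_eq_nil_iff]
        intro idx hidx
        rw [List.mem_range'_1] at hidx
        obtain ⟨hidx1, hidx2⟩ := hidx
        have hidxlen : idx < a.length := by omega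
        have hge : mx < a.getD idx 0 := by
          rcases Nat.eq_or_lt_of_le hidx1 with h | h
          · rw [← h]; omega
          · have := hmono j idx h hidxlen; omega
        simp only [Bool.and_eq_true, decide_eq_true_eq, not_and]
        intro _; omega
      refine ⟨fa, L, ?_, hInv, ?_, ?_⟩
      · simp only [pvInner]; rw [if_neg he, hWnil]; simp
      · intro z; simp [hWnil]
      · simp [hWnil]

theorem pvBisectLeft_le (a : List Int) (n mn : Int) (hlen : 1 ≤ a.length)
    (hn : a.getD (a.length - 1) 0 = n) (hmn : mn ≤ n) : pvBisectLeft a mn ≤ a.length - 1 := by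
  rcases pvTakeWhileSpec (fun v => decide (v < mn)) a with ⟨h1, _⟩
  unfold pvBisectLeft
  by_contra hc
  have hle := (List.takeWhile_sublist (p := fun v => decide (v < mn)) (l := a)).length_le
  have heq : (a.takeWhile fun v => decide (v < mn)).length = a.length := by omega
  have := h1 (a.length - 1) (by omega)
  rw [hn] at this
  simp at this
  omega

theorem pvBisectLeft_lower (a : List Int) (mn : Int) (idx : Nat) (h : idx < pvBisectLeft a mn) :
    a.getD idx 0 < mn := by
  rcases pvTakeWhileSpec (fun v => decide (v < mn)) a with ⟨h1, _⟩
  have := h1 idx h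
  simpa using this

theorem pvBisectLeft_upper (a : List Int) (mn : Int) (h : pvBisectLeft a mn < a.length) :
    mn ≤ a.getD (pvBisectLeft a mn) 0 := by
  rcases pvTakeWhileSpec (fun v => decide (v < mn)) a with ⟨_, h2⟩
  have := h2 h
  simp at this
  exact this

theorem pvWIdx_start (a : List Int) (n mn mx : Int) (L : Nat → Bool)
    (hmono : ∀ i j : Nat, i < j → j < a.length → a.getD i 0 < a.getD j 0)
    (hn : a.getD (a.length - 1) 0 = n) (hlen : 1 ≤ a.length)
    (hlast : L (a.length - 1) = true) (hmn : mn ≤ n) :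
    pvWIdx a L mx (pvNxt L (a.length - 1) (pvBisectLeft a mn)) =
      (List.range' 0 a.length).filter
        (fun idx => L idx && decide (mn ≤ a.getD idx 0) && decide (a.getD idx 0 ≤ mx)) := by
  obtain ⟨bl, hbl⟩ : ∃ t, t = pvBisectLeft a mn := ⟨_, rfl⟩
  have hblle : bl ≤ a.length - 1 := by rw [hbl]; exact pvBisectLeft_le a n mn hlen hn hmn
  rw [← hbl]
  obtain ⟨j0, hj0⟩ : ∃ t, t = pvNxt L (a.length - 1) bl := ⟨_, rfl⟩
  rw [← hj0]
  have hj0ge : bl ≤ j0 := by rw [hj0]; exact pvNxt_ge L (a.length - 1) bl (by omega)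
  have hj0le : j0 ≤ a.length - 1 := by rw [hj0]; exact pvNxt_le L (a.length - 1) bl
  rw [pvRange'_split 0 bl a.length (by omega)]
  simp only [Nat.zero_add]
  rw [pvRange'_split bl (j0 - bl) (a.length - bl) (by omega)]
  simp only [List.filter_append]
  have hc1 : (List.range' 0 bl).filter
      (fun idx => L idx && decide (mn ≤ a.getD idx 0) && decide (a.getD idx 0 ≤ mx)) = [] := by
    rw [List.filter_eq_nil_iff]
    intro idx hidx
    rw [List.mem_range'_1] at hidx
    have := pvBisectLeft_lower a mn idx (by rw [← hbl]; omega)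
    simp only [Bool.and_eq_true, decide_eq_true_eq, not_and]
    intro _ h2; omega
  have hc2 : (List.range' bl (j0 - bl)).filter
      (fun idx => L idx && decide (mn ≤ a.getD idx 0) && decide (a.getD idx 0 ≤ mx)) = [] := by
    rw [List.filter_eq_nil_iff]
    intro idx hidx
    rw [List.mem_range'_1] at hidx
    have : L idx = false := pvNxt_dead L (a.length - 1) bl idx (by omega) (by omega)
    simp [this]
  rw [hc1, hc2]
  simp only [List.nil_append]
  have harith : bl + (j0 - bl) = j0 := by omega
  rw [harith]
  have harith2 : a.length - bl - (j0 - bl) = a.length - j0 := by omega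
  rw [harith2]
  unfold pvWIdx
  symm
  apply List.filter_congr
  intro idx hidx
  rw [List.mem_range'_1] at hidx
  have hidxlen : idx < a.length := by omega
  have hmnle : mn ≤ a.getD idx 0 := by
    rcases Nat.eq_or_lt_of_le (le_trans hj0ge hidx.1 : bl ≤ idx) with h | h
    · rw [← h, hbl]; exact pvBisectLeft_upper a mn (by rw [← hbl]; omega)
    · have h1 := pvBisectLeft_upper a mn (by rw [← hbl]; omega)
      rw [← hbl] at h1
      have h2 := hmono bl idx h hidxlen
      omega
  rw [decide_eq_true hmnle]
  simp only [Bool.and_true]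

def pvDeadVal (a : List Int) (L : Nat → Bool) (v : Int) : Prop :=
  ∃ idx, idx + 1 < a.length ∧ L idx = false ∧ a.getD idx 0 = v

def pvLiveCt (L : Nat → Bool) (last : Nat) : Nat := ((List.range last).filter L).length

def pvRel (n : Int) (s0 base0 base1 : List Int) (L0 L1 : Nat → Bool) (sA : PvA) (sB : PvB) : Prop :=
  sA.q = sB.q ∧
  InvUF (base0 ++ [n]) sA.fa0 L0 ∧ InvUF (base1 ++ [n]) sA.fa1 L1 ∧
  (∀ v, v ∈ sB.visited ↔ v ∈ s0 ∨ pvDeadVal (base0 ++ [n]) L0 v ∨ pvDeadVal (base1 ++ [n]) L1 v) ∧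
  (∀ v ∈ sB.q, 0 ≤ v ∧ v < n ∧ v ∈ sB.visited)

theorem pvCountPSplitNat (P Q R : Nat → Bool) : ∀ (l : List Nat),
    (∀ z ∈ l, P z = (Q z || R z) ∧ ¬(Q z = true ∧ R z = true)) →
    l.countP P = l.countP Q + l.countP R
  | [], _ => rfl
  | x :: l, h => by
    have hx := h x (.head _)
    have hl := pvCountPSplitNat P Q R l (fun z hz => h z (.tail _ hz))
    simp only [List.countP_cons, hl]
    rcases hx with ⟨h1, h2⟩
    cases hq : Q x <;> cases hr : R x <;> simp [hq, hr] at h1 h2 ⊢ <;> simp [h1] <;> omega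

theorem pvLiveCt_drop (L L' : Nat → Bool) (last : Nat) (S : List Nat)
    (hrel : ∀ z, L' z = (L z && decide (z ∉ S)))
    (hS : ∀ idx ∈ S, L idx = true ∧ idx < last) (hnd : S.Nodup) :
    pvLiveCt L' last + S.length = pvLiveCt L last := by
  unfold pvLiveCt
  have e1 : ∀ (P : Nat → Bool), ((List.range last).filter P).length = (List.range last).countP P :=
    fun P => List.countP_eq_length_filter.symm
  rw [e1, e1]
  have hsplit := pvCountPSplitNat L L' (fun z => decide (z ∈ S)) (List.range last) ?_
  · rw [hsplit]
    have hperm : ((List.range last).filter (fun z => decide (z ∈ S))).Perm S := by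
      rw [List.perm_ext_iff_of_nodup ((List.nodup_range).filter _) hnd]
      intro x
      simp only [List.mem_filter, List.mem_range, decide_eq_true_eq]
      exact ⟨fun h => h.2, fun h => ⟨(hS x h).2, h⟩⟩
    have hlen := hperm.length_eq
    rw [e1] at hlen
    omega
  · intro z _
    have h1 := hrel z
    by_cases hzS : z ∈ S
    · have := (hS z hzS).1
      constructor
      · simp [hzS, this]
      · simp [h1, hzS]
    · constructor
      · simp [h1, hzS]
      · simp [hzS]

theorem pvProcBFold (step : Int) : ∀ (l : List Int) (t : PvB), l.Nodup →
    ((l.foldl (fun (t : PvB) j =>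
        if j ∈ t.visited then t
        else ⟨PySem.Set.add t.visited j, PySem.List.pySetD t.ans j step, t.q ++ [j]⟩) t).q =
      t.q ++ l.filter (fun j => decide (j ∉ t.visited))) ∧
    ((l.foldl (fun (t : PvB) j =>
        if j ∈ t.visited then t
        else ⟨PySem.Set.add t.visited j, PySem.List.pySetD t.ans j step, t.q ++ [j]⟩) t).ans =
      (l.filter (fun j => decide (j ∉ t.visited))).foldl (fun a v => PySem.List.pySetD a v step) t.ans) ∧
    (∀ v, v ∈ (l.foldl (fun (t : PvB) j =>
        if j ∈ t.visited then t
        else ⟨PySem.Set.add t.visited j, PySem.List.pySetD t.ans j step, t.q ++ [j]⟩) t).visited ↔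
      v ∈ t.visited ∨ v ∈ l.filter (fun j => decide (j ∉ t.visited)))
  | [], t, _ => by simp
  | j :: l, t, hnd => by
    rcases List.nodup_cons.1 hnd with ⟨hjl, hndl⟩
    by_cases hj : j ∈ t.visited
    · have hstep : (if j ∈ t.visited then t
          else PvB.mk (PySem.Set.add t.visited j) (PySem.List.pySetD t.ans j step) (t.q ++ [j])) = t :=
        if_pos hj
      have hfilt : (j :: l).filter (fun j' => decide (j' ∉ t.visited)) =
          l.filter (fun j' => decide (j' ∉ t.visited)) := by
        rw [List.filter_cons]; simp [hj]
      rcases pvProcBFold step l t hndl with ⟨hq, hans, hvis⟩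
      refine ⟨?_, ?_, ?_⟩
      · rw [List.foldl_cons, hstep, hfilt]; exact hq
      · rw [List.foldl_cons, hstep, hfilt]; exact hans
      · intro v; rw [List.foldl_cons, hstep, hfilt]; exact hvis v
    · set t' : PvB := ⟨PySem.Set.add t.visited j, PySem.List.pySetD t.ans j step, t.q ++ [j]⟩ with ht'
      have hstep : (if j ∈ t.visited then t
          else PvB.mk (PySem.Set.add t.visited j) (PySem.List.pySetD t.ans j step) (t.q ++ [j])) = t' :=
        if_neg hj
      have hfilt : (j :: l).filter (fun j' => decide (j' ∉ t.visited)) =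
          j :: l.filter (fun j' => decide (j' ∉ t.visited)) := by
        rw [List.filter_cons]; simp [hj]
      have hfilt2 : l.filter (fun j' => decide (j' ∉ t'.visited)) =
          l.filter (fun j' => decide (j' ∉ t.visited)) := by
        apply List.filter_congr
        intro x hx
        have hxj : x ≠ j := fun h => hjl (h ▸ hx)
        have : x ∈ t'.visited ↔ x ∈ t.visited := by
          rw [ht']
          show x ∈ PySem.Set.add t.visited j ↔ _
          rw [PySem.Set.mem_add]
          simp [hxj]
        simp [this]
      rcases pvProcBFold step l t' hndl with ⟨hq, hans, hvis⟩
      refine ⟨?_, ?_, ?_⟩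
      · rw [List.foldl_cons, hstep, hfilt, hq, hfilt2, ht']
        simp
      · rw [List.foldl_cons, hstep, hfilt, hans, hfilt2]
        rw [List.foldl_cons]
      · intro v
        rw [List.foldl_cons, hstep, hfilt, hvis v, hfilt2]
        have hmemt' : (v ∈ t'.visited) ↔ v ∈ t.visited ∨ v = j := by
          rw [ht']
          exact PySem.Set.mem_add t.visited j v
        rw [hmemt']
        constructor
        · rintro ((hv | hv) | hv)
          · exact Or.inl hv
          · exact Or.inr (by rw [hv]; exact .head _)
          · exact Or.inr (.tail _ hv)
        · rintro (hv | hv)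
          · exact Or.inl (Or.inl hv)
          · rcases List.mem_cons.1 hv with hv | hv
            · exact Or.inl (Or.inr hv)
            · exact Or.inr hv

theorem pvGetD_append_left (l : List Int) (x : Int) (idx : Nat) (h : idx < l.length) :
    (l ++ [x]).getD idx 0 = l.getD idx 0 := by
  rw [pvGetD_eq_getElem _ _ _ (by simp; omega), pvGetD_eq_getElem _ _ _ h]
  exact List.getElem_append_left h

theorem pvBaseFacts (nv : Int) (base : List Int) (hs : base.Pairwise (· < ·))
    (hlt : ∀ v ∈ base, v < nv) :
    (∀ i j : Nat, i < j → j < (base ++ [nv]).length →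
      (base ++ [nv]).getD i 0 < (base ++ [nv]).getD j 0) ∧
    (base ++ [nv]).getD ((base ++ [nv]).length - 1) 0 = nv := by
  have hPA : (base ++ [nv]).Pairwise (· < ·) := by
    rw [List.pairwise_append]
    exact ⟨hs, by simp, fun x hx y hy => by simp at hy; rw [hy]; exact hlt x hx⟩
  constructor
  · intro i j hij hj
    rw [pvGetD_eq_getElem _ _ _ (by omega), pvGetD_eq_getElem _ _ _ hj]
    exact List.pairwise_iff_getElem.1 hPA i j (by omega) hj hij
  · have hlen : (base ++ [nv]).length = base.length + 1 := by simp
    rw [pvGetD_eq_getElem _ _ _ (by omega)]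
    simp

theorem pvWindow (nv mn mx par opar : Int) (s0 base obase : List Int) (L Lo : Nat → Bool)
    (hpar : (par = 0 ∧ opar = 1) ∨ (par = 1 ∧ opar = 0))
    (hbm : ∀ v, v ∈ base ↔ 0 ≤ v ∧ v < nv ∧ v ∉ s0 ∧ v % 2 = par)
    (hobm : ∀ v, v ∈ obase ↔ 0 ≤ v ∧ v < nv ∧ v ∉ s0 ∧ v % 2 = opar)
    (hbs : base.Pairwise (· < ·))
    (fa : List Int) (hInv : InvUF (base ++ [nv]) fa L)
    (visited : List Int)
    (hvis : ∀ v, v ∈ visited ↔ v ∈ s0 ∨ pvDeadVal (base ++ [nv]) L v ∨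
      pvDeadVal (obase ++ [nv]) Lo v)
    (hmn0 : 0 ≤ mn) (hmnpar : mn % 2 = par) (hmxn : mx < nv) (hmnn : mn ≤ nv) (q : List Int) :
    ∃ fa' L',
      pvInner (base ++ [nv]) mx (pvFind fa (pvBisectLeft (base ++ [nv]) mn) fa.length).1
          (pvFind fa (pvBisectLeft (base ++ [nv]) mn) fa.length).2 q (base ++ [nv]).length =
        (fa', q ++ (PySem.List.pyRange mn (mx + 1) 2).filter (fun j => decide (j ∉ visited))) ∧
      InvUF (base ++ [nv]) fa' L' ∧
      (∀ v, pvDeadVal (base ++ [nv]) L' v ↔ pvDeadVal (base ++ [nv]) L v ∨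
        v ∈ (PySem.List.pyRange mn (mx + 1) 2).filter (fun j => decide (j ∉ visited))) ∧
      pvLiveCt L' base.length +
        ((PySem.List.pyRange mn (mx + 1) 2).filter (fun j => decide (j ∉ visited))).length =
        pvLiveCt L base.length ∧
      (∀ v ∈ (PySem.List.pyRange mn (mx + 1) 2).filter (fun j => decide (j ∉ visited)),
        0 ≤ v ∧ v < nv ∧ v ∉ visited) := by
  have hblt : ∀ v ∈ base, v < nv := fun v hv => ((hbm v).1 hv).2.1
  obtain ⟨hmono, hlastval⟩ := pvBaseFacts nv base hbs hblt
  have hInv0 := hInv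
  rcases hInv0 with ⟨hfalen, hpos, hlastL, _⟩
  have halen : (base ++ [nv]).length = base.length + 1 := by simp
  -- the initial find lands on the first live index at or after bisect_left
  have hblle : pvBisectLeft (base ++ [nv]) mn ≤ (base ++ [nv]).length - 1 :=
    pvBisectLeft_le (base ++ [nv]) nv mn hpos hlastval hmnn
  have hF := pvFind_spec (base ++ [nv]) L fa.length fa (pvBisectLeft (base ++ [nv]) mn)
    hInv hblle (by omega)
  rcases hF with ⟨hF2, hFInv⟩
  obtain ⟨j0, hj0⟩ : ∃ t, t = pvNxt L ((base ++ [nv]).length - 1)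
      (pvBisectLeft (base ++ [nv]) mn) := ⟨_, rfl⟩
  have hj0le : j0 ≤ (base ++ [nv]).length - 1 := by
    rw [hj0]; exact pvNxt_le L _ _
  have hLj0 : L j0 = true := by
    rw [hj0]; exact pvNxt_live L _ _ hlastL
  have hI := pvInner_spec (base ++ [nv]) nv mx hmono hlastval hmxn (base ++ [nv]).length
    (pvFind fa (pvBisectLeft (base ++ [nv]) mn) fa.length).1 L j0 q hFInv hLj0 hj0le (by omega)
  rcases hI with ⟨fa', L', heq, hInv', hLrel, hWmem⟩
  -- the collected index set, characterised from the start of the window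
  have hWstart : pvWIdx (base ++ [nv]) L mx j0 =
      (List.range' 0 (base ++ [nv]).length).filter
        (fun idx => L idx && decide (mn ≤ (base ++ [nv]).getD idx 0) &&
          decide ((base ++ [nv]).getD idx 0 ≤ mx)) := by
    rw [hj0]
    exact pvWIdx_start (base ++ [nv]) nv mn mx L hmono hlastval hpos hlastL hmnn
  -- the collected values equal B's filtered window scan
  have hvals : (pvWIdx (base ++ [nv]) L mx j0).map (fun idx => (base ++ [nv]).getD idx 0) =
      (PySem.List.pyRange mn (mx + 1) 2).filter (fun j => decide (j ∉ visited)) := by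
    apply pvSortedExt
    · -- strictly increasing: increasing indices mapped through a strictly increasing list
      apply (List.pairwise_map).2
      have hpw : (pvWIdx (base ++ [nv]) L mx j0).Pairwise (· < ·) := by
        rw [hWstart]
        rw [← List.range_eq_range']
        exact (List.pairwise_lt_range).filter _
      apply hpw.imp_of_mem
      intro x y hx hy hxy
      have hylen : y < (base ++ [nv]).length := by
        rw [hWstart] at hy
        have := (List.mem_filter.1 hy).1
        rw [List.mem_range'_1] at this
        omega
      exact hmono x y hxy hylen
    · -- B's window list is strictly increasing as well
      have : (PySem.List.pyRange mn (mx + 1) 2).Pairwise (· < ·) := by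
        rw [PySem.List.pyRange_of_pos mn (mx + 1) (by norm_num)]
        refine (List.pairwise_map).2 ?_
        refine List.Pairwise.imp_of_mem ?_ List.pairwise_lt_range
        intro x y _ _ hxy
        omega
      exact this.filter _
    · -- same membership
      intro v
      have hdvo : v % 2 = par → ¬ pvDeadVal (obase ++ [nv]) Lo v := by
        intro hvp hd
        rcases hd with ⟨idx, hidx, _, hval⟩
        have hidx' : idx < obase.length := by
          have : (obase ++ [nv]).length = obase.length + 1 := by simp
          omega
        rw [pvGetD_append_left _ _ _ hidx', pvGetD_eq_getElem _ _ _ hidx'] at hval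
        have : obase[idx] ∈ obase := List.getElem_mem _
        rw [hval] at this
        have := ((hobm v).1 this).2.2.2
        omega
      constructor
      · rintro hv
        rcases List.mem_map.1 hv with ⟨idx, hidxW, hval⟩
        rw [hWstart] at hidxW
        rcases List.mem_filter.1 hidxW with ⟨hidxr, hcond⟩
        rw [List.mem_range'_1] at hidxr
        simp only [Bool.and_eq_true, decide_eq_true_eq] at hcond
        rcases hcond with ⟨⟨hLidx, hmnle⟩, hmxle⟩
        have hidxbase : idx < base.length := by
          rcases Nat.lt_or_ge idx base.length with h | h
          · exact h
          · exfalso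
            have : idx = base.length := by omega
            rw [this] at hmxle
            rw [show base.length = (base ++ [nv]).length - 1 by omega] at hmxle
            rw [hlastval] at hmxle
            omega
        have hvb : v ∈ base := by
          rw [← hval, pvGetD_append_left _ _ _ hidxbase, pvGetD_eq_getElem _ _ _ hidxbase]
          exact List.getElem_mem _
        rcases (hbm v).1 hvb with ⟨hv0, hvn, hvs0, hvp⟩
        rw [List.mem_filter]
        constructor
        · rw [PySem.List.mem_pyRange_iff_of_pos (by norm_num)]
          refine ⟨by omega, by omega, by omega⟩
        · simp only [decide_eq_true_eq]
          rw [hvis]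
          simp only [not_or]
          refine ⟨hvs0, ?_, hdvo hvp⟩
          -- not dead on its own parity: its index is live and indices are unique
          rintro ⟨idx2, hidx2, hLidx2, hval2⟩
          have hne : idx2 = idx := by
            by_contra hne
            rcases Nat.lt_or_ge idx2 idx with h | h
            · have := hmono idx2 idx h (by omega)
              rw [hval2, hval] at this
              omega
            · have : idx < idx2 := by omega
              have := hmono idx idx2 this (by omega)
              rw [hval2, hval] at this
              omega
          rw [hne] at hLidx2
          rw [hLidx2] at hLidx
          exact absurd hLidx (by simp)
      · intro hv
        rcases List.mem_filter.1 hv with ⟨hvr, hvnv⟩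
        rw [PySem.List.mem_pyRange_iff_of_pos (by norm_num)] at hvr
        rcases hvr with ⟨hvmn, hvmx, hvdvd⟩
        simp only [decide_eq_true_eq] at hvnv
        rw [hvis] at hvnv
        simp only [not_or] at hvnv
        rcases hvnv with ⟨hvs0, hvd, _⟩
        have hvp : v % 2 = par := by omega
        have hvb : v ∈ base := (hbm v).2 ⟨by omega, by omega, hvs0, hvp⟩
        rcases List.mem_iff_getElem.1 hvb with ⟨idx, hidx, hval⟩
        have hgv0 : (base ++ [nv]).getD idx 0 = v := by
          rw [pvGetD_append_left _ _ _ hidx, pvGetD_eq_getElem _ _ _ hidx]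
          exact hval
        have hLidx : L idx = true := by
          by_contra hL
          exact hvd ⟨idx, by omega, by simpa using hL, hgv0⟩
        apply List.mem_map.2
        have hgv : (base ++ [nv]).getD idx 0 = v := by
          rw [pvGetD_append_left _ _ _ hidx, pvGetD_eq_getElem _ _ _ hidx]
          exact hval
        refine ⟨idx, ?_, hgv⟩
        rw [hWstart]
        rw [List.mem_filter]
        constructor
        · rw [List.mem_range'_1]; omega
        · simp only [Bool.and_eq_true, decide_eq_true_eq]
          rw [hgv0]
          exact ⟨⟨hLidx, by omega⟩, by omega⟩
  have hWnodup : (pvWIdx (base ++ [nv]) L mx j0).Nodup := by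
    rw [hWstart, ← List.range_eq_range']
    exact (List.nodup_range).filter _
  refine ⟨fa', L', ?_, hInv', ?_, ?_, ?_⟩
  · rw [hF2, ← hj0, heq, hvals]
  · intro v
    rw [← hvals]
    constructor
    · rintro ⟨idx, hidx, hLidx, hval⟩
      have := hLrel idx
      rw [hLidx] at this
      rcases Bool.and_eq_false_iff.1 this.symm with h | h
      · exact Or.inl ⟨idx, hidx, h, hval⟩
      · simp only [decide_eq_false_iff_not, not_not] at h
        exact Or.inr (List.mem_map.2 ⟨idx, h, hval⟩)
    · rintro (⟨idx, hidx, hLidx, hval⟩ | hv)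
      · refine ⟨idx, hidx, ?_, hval⟩
        rw [hLrel idx, hLidx]
        simp
      · rcases List.mem_map.1 hv with ⟨idx, hidxW, hval⟩
        refine ⟨idx, ?_, ?_, hval⟩
        · have := (hWmem idx hidxW).2; omega
        · rw [hLrel idx]
          simp [hidxW]
  · rw [← hvals, List.length_map]
    exact pvLiveCt_drop L L' base.length (pvWIdx (base ++ [nv]) L mx j0) hLrel
      (fun idx hidx => ⟨(hWmem idx hidx).1, by have := (hWmem idx hidx).2; omega⟩) hWnodup
  · intro v hv
    rcases List.mem_filter.1 hv with ⟨hvr, hvnv⟩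
    rw [PySem.List.mem_pyRange_iff_of_pos (by norm_num)] at hvr
    simp only [decide_eq_true_eq] at hvnv
    exact ⟨by omega, by omega, hvnv⟩

theorem pvMod2 (a : Int) : PySem.Int.mod a 2 = a % 2 := by
  simp [PySem.Int.mod, Int.fmod_eq_emod]

theorem pvProcAB (n k t : Int) (s0 base0 base1 : List Int)
    (hk1 : 1 ≤ k) (hkn : k ≤ n)
    (hbm0 : ∀ v, v ∈ base0 ↔ 0 ≤ v ∧ v < n ∧ v ∉ s0 ∧ v % 2 = 0)
    (hbm1 : ∀ v, v ∈ base1 ↔ 0 ≤ v ∧ v < n ∧ v ∉ s0 ∧ v % 2 = 1)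
    (hbs0 : base0.Pairwise (· < ·)) (hbs1 : base1.Pairwise (· < ·))
    (L0 L1 : Nat → Bool) (sA : PvA) (sB : PvB)
    (hR : pvRel n s0 base0 base1 L0 L1 sA sB)
    (i : Int) (hi0 : 0 ≤ i) (hin : i < n) (hiv : i ∈ sB.visited) :
    ∃ L0' L1' New,
      pvRel n s0 base0 base1 L0' L1' (pvProcA n k t (base0 ++ [n]) (base1 ++ [n]) sA i)
        (pvProcB n k (t + 1) sB i) ∧
      (pvProcA n k t (base0 ++ [n]) (base1 ++ [n]) sA i).q = sA.q ++ New ∧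
      (pvProcA n k t (base0 ++ [n]) (base1 ++ [n]) sA i).ans = PySem.List.pySetD sA.ans i t ∧
      (pvProcB n k (t + 1) sB i).ans =
        New.foldl (fun a v => PySem.List.pySetD a v (t + 1)) sB.ans ∧
      (∀ v, v ∈ sB.visited → v ∈ (pvProcB n k (t + 1) sB i).visited) ∧
      pvLiveCt L0' base0.length + pvLiveCt L1' base1.length + New.length =
        pvLiveCt L0 base0.length + pvLiveCt L1 base1.length ∧
      (∀ v ∈ New, 0 ≤ v ∧ v < n) := by
  rcases hR with ⟨hq, hI0, hI1, hvis, hqp⟩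
  have hmn0 : 0 ≤ max (i - k + 1) (k - i - 1) := by
    rcases max_cases (i - k + 1) (k - i - 1) with ⟨h, _⟩ | ⟨h, _⟩ <;> omega
  have hmxn : min (i + k - 1) (n * 2 - k - i - 1) < n := by
    rcases min_cases (i + k - 1) (n * 2 - k - i - 1) with ⟨h, _⟩ | ⟨h, _⟩ <;> omega
  have hmnn : max (i - k + 1) (k - i - 1) ≤ n := by
    rcases max_cases (i - k + 1) (k - i - 1) with ⟨h, _⟩ | ⟨h, _⟩ <;> omega
  have hmx2 : n * 2 - k - i - 1 = 2 * n - k - i - 1 := by ring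
  have hrangeNodup : (PySem.List.pyRange (max (i - k + 1) (k - i - 1))
      (min (i + k - 1) (2 * n - k - i - 1) + 1) 2).Nodup := by
    have hpw : (PySem.List.pyRange (max (i - k + 1) (k - i - 1))
        (min (i + k - 1) (2 * n - k - i - 1) + 1) 2).Pairwise (· < ·) := by
      rw [PySem.List.pyRange_of_pos _ _ (by norm_num : (0:Int) < 2)]
      refine (List.pairwise_map).2 ?_
      refine List.Pairwise.imp_of_mem ?_ List.pairwise_lt_range
      intro x y _ _ hxy
      omega
    exact hpw.imp (fun h => ne_of_lt h)
  have hBfold := pvProcBFold (t + 1) (PySem.List.pyRange (max (i - k + 1) (k - i - 1))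
      (min (i + k - 1) (2 * n - k - i - 1) + 1) 2) sB hrangeNodup
  rcases hBfold with ⟨hBq, hBans, hBvis⟩
  have hB : pvProcB n k (t + 1) sB i = (PySem.List.pyRange (max (i - k + 1) (k - i - 1))
      (min (i + k - 1) (2 * n - k - i - 1) + 1) 2).foldl
      (fun (t' : PvB) j => if j ∈ t'.visited then t'
        else ⟨PySem.Set.add t'.visited j, PySem.List.pySetD t'.ans j (t + 1), t'.q ++ [j]⟩) sB := by
    simp only [pvProcB]
  have hpar2 : max (i - k + 1) (k - i - 1) % 2 = 0 ∨ max (i - k + 1) (k - i - 1) % 2 = 1 := by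
    omega
  rcases hpar2 with hp | hp
  · -- even parity: the window lives in base0
    have hW := pvWindow n (max (i - k + 1) (k - i - 1)) (min (i + k - 1) (n * 2 - k - i - 1))
      0 1 s0 base0 base1 L0 L1 (Or.inl ⟨rfl, rfl⟩) hbm0 hbm1 hbs0 sA.fa0 hI0 sB.visited hvis
      hmn0 hp hmxn hmnn sA.q
    rcases hW with ⟨fa', L0', heqn, hInv', hdead', hliveCt, hNewProps⟩
    set New := (PySem.List.pyRange (max (i - k + 1) (k - i - 1))
      (min (i + k - 1) (n * 2 - k - i - 1) + 1) 2).filter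
      (fun j => decide (j ∉ sB.visited)) with hNew
    have hA : pvProcA n k t (base0 ++ [n]) (base1 ++ [n]) sA i =
        ⟨fa', sA.fa1, PySem.List.pySetD sA.ans i t, sA.q ++ New⟩ := by
      simp only [pvProcA]
      rw [if_pos (by rw [pvMod2]; exact hp)]
      rw [heqn]
    have hNewB : New = (PySem.List.pyRange (max (i - k + 1) (k - i - 1))
        (min (i + k - 1) (2 * n - k - i - 1) + 1) 2).filter
        (fun j => decide (j ∉ sB.visited)) := by
      rw [hNew, hmx2]
    refine ⟨L0', L1, New, ?_, ?_, ?_, ?_, ?_, ?_, ?_⟩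
    · refine ⟨?_, ?_, ?_, ?_, ?_⟩
      · rw [hA, hB, hBq, ← hNewB, hq]
      · rw [hA]; exact hInv'
      · rw [hA]; exact hI1
      · intro v
        rw [hB, hBvis v, ← hNewB, hdead' v, hvis v]
        tauto
      · intro v hv
        rw [hB, hBq, ← hNewB] at hv
        rw [hB, hBvis v, ← hNewB]
        rcases List.mem_append.1 hv with hv' | hv'
        · rcases hqp v hv' with ⟨h1, h2, h3⟩
          exact ⟨h1, h2, Or.inl h3⟩
        · rcases hNewProps v hv' with ⟨h1, h2, _⟩
          exact ⟨h1, h2, Or.inr hv'⟩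
    · rw [hA]
    · rw [hA]
    · rw [hB, hBans, ← hNewB]
    · intro v hv
      rw [hB, hBvis v]
      exact Or.inl hv
    · omega
    · intro v hv
      rcases hNewProps v hv with ⟨h1, h2, _⟩
      exact ⟨h1, h2⟩
  · -- odd parity: the window lives in base1
    have hW := pvWindow n (max (i - k + 1) (k - i - 1)) (min (i + k - 1) (n * 2 - k - i - 1))
      1 0 s0 base1 base0 L1 L0 (Or.inr ⟨rfl, rfl⟩) hbm1 hbm0 hbs1 sA.fa1 hI1 sB.visited
      (fun v => by rw [hvis v]; tauto) hmn0 hp hmxn hmnn sA.q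
    rcases hW with ⟨fa', L1', heqn, hInv', hdead', hliveCt, hNewProps⟩
    set New := (PySem.List.pyRange (max (i - k + 1) (k - i - 1))
      (min (i + k - 1) (n * 2 - k - i - 1) + 1) 2).filter
      (fun j => decide (j ∉ sB.visited)) with hNew
    have hA : pvProcA n k t (base0 ++ [n]) (base1 ++ [n]) sA i =
        ⟨sA.fa0, fa', PySem.List.pySetD sA.ans i t, sA.q ++ New⟩ := by
      simp only [pvProcA]
      rw [if_neg (by rw [pvMod2]; omega)]
      rw [heqn]
    have hNewB : New = (PySem.List.pyRange (max (i - k + 1) (k - i - 1))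
        (min (i + k - 1) (2 * n - k - i - 1) + 1) 2).filter
        (fun j => decide (j ∉ sB.visited)) := by
      rw [hNew, hmx2]
    refine ⟨L0, L1', New, ?_, ?_, ?_, ?_, ?_, ?_, ?_⟩
    · refine ⟨?_, ?_, ?_, ?_, ?_⟩
      · rw [hA, hB, hBq, ← hNewB, hq]
      · rw [hA]; exact hI0
      · rw [hA]; exact hInv'
      · intro v
        rw [hB, hBvis v, ← hNewB, hdead' v, hvis v]
        tauto
      · intro v hv
        rw [hB, hBq, ← hNewB] at hv
        rw [hB, hBvis v, ← hNewB]
        rcases List.mem_append.1 hv with hv' | hv'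
        · rcases hqp v hv' with ⟨h1, h2, h3⟩
          exact ⟨h1, h2, Or.inl h3⟩
        · rcases hNewProps v hv' with ⟨h1, h2, _⟩
          exact ⟨h1, h2, Or.inr hv'⟩
    · rw [hA]
    · rw [hA]
    · rw [hB, hBans, ← hNewB]
    · intro v hv
      rw [hB, hBvis v]
      exact Or.inl hv
    · omega
    · intro v hv
      rcases hNewProps v hv with ⟨h1, h2, _⟩
      exact ⟨h1, h2⟩

theorem pvLevelAB (n k : Int) (s0 base0 base1 : List Int)
    (hk1 : 1 ≤ k) (hkn : k ≤ n)
    (hbm0 : ∀ v, v ∈ base0 ↔ 0 ≤ v ∧ v < n ∧ v ∉ s0 ∧ v % 2 = 0)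
    (hbm1 : ∀ v, v ∈ base1 ↔ 0 ≤ v ∧ v < n ∧ v ∉ s0 ∧ v % 2 = 1)
    (hbs0 : base0.Pairwise (· < ·)) (hbs1 : base1.Pairwise (· < ·)) :
    ∀ (tmp : List Int) (sA : PvA) (sB : PvB) (L0 L1 : Nat → Bool) (t : Int),
      pvRel n s0 base0 base1 L0 L1 sA sB →
      (∀ i ∈ tmp, 0 ≤ i ∧ i < n ∧ i ∈ sB.visited) →
      sB.ans = sA.q.foldl (fun a v => PySem.List.pySetD a v (t + 1))
        (tmp.foldl (fun a v => PySem.List.pySetD a v t) sA.ans) →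
      ∃ L0' L1',
        pvRel n s0 base0 base1 L0' L1'
          (tmp.foldl (pvProcA n k t (base0 ++ [n]) (base1 ++ [n])) sA)
          (tmp.foldl (pvProcB n k (t + 1)) sB) ∧
        (tmp.foldl (pvProcB n k (t + 1)) sB).ans =
          (tmp.foldl (pvProcA n k t (base0 ++ [n]) (base1 ++ [n])) sA).q.foldl
            (fun a v => PySem.List.pySetD a v (t + 1))
            (tmp.foldl (pvProcA n k t (base0 ++ [n]) (base1 ++ [n])) sA).ans ∧
        pvLiveCt L0' base0.length + pvLiveCt L1' base1.length +
          (tmp.foldl (pvProcA n k t (base0 ++ [n]) (base1 ++ [n])) sA).q.length =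
          pvLiveCt L0 base0.length + pvLiveCt L1 base1.length + sA.q.length
  | [], sA, sB, L0, L1, t, hR, _, hans => by
    refine ⟨L0, L1, hR, ?_, rfl⟩
    simpa using hans
  | i :: tmp', sA, sB, L0, L1, t, hR, htmp, hans => by
    rcases htmp i (.head _) with ⟨hi0, hin, hiv⟩
    rcases pvProcAB n k t s0 base0 base1 hk1 hkn hbm0 hbm1 hbs0 hbs1 L0 L1 sA sB hR i hi0 hin hiv
      with ⟨L0m, L1m, New, hRm, hAq, hAans, hBans, hBmono, hcount, hNewProps⟩
    have htmp' : ∀ j ∈ tmp', 0 ≤ j ∧ j < n ∧ j ∈ (pvProcB n k (t + 1) sB i).visited := by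
      intro j hj
      rcases htmp j (.tail _ hj) with ⟨h1, h2, h3⟩
      exact ⟨h1, h2, hBmono j h3⟩
    have hans' : (pvProcB n k (t + 1) sB i).ans =
        (pvProcA n k t (base0 ++ [n]) (base1 ++ [n]) sA i).q.foldl
          (fun a v => PySem.List.pySetD a v (t + 1))
          (tmp'.foldl (fun a v => PySem.List.pySetD a v t)
            (pvProcA n k t (base0 ++ [n]) (base1 ++ [n]) sA i).ans) := by
      rw [hBans, hans, hAq, hAans]
      rw [List.foldl_append]
      rfl
    rcases pvLevelAB n k s0 base0 base1 hk1 hkn hbm0 hbm1 hbs0 hbs1 tmp'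
      (pvProcA n k t (base0 ++ [n]) (base1 ++ [n]) sA i) (pvProcB n k (t + 1) sB i)
      L0m L1m t hRm htmp' hans'
      with ⟨L0', L1', hRf, hansf, hcountf⟩
    refine ⟨L0', L1', ?_, ?_, ?_⟩
    · rw [List.foldl_cons, List.foldl_cons]; exact hRf
    · rw [List.foldl_cons, List.foldl_cons]; exact hansf
    · rw [List.foldl_cons]
      rw [hcountf, hAq]
      simp
      omega

theorem pvLoopAB (n k : Int) (s0 base0 base1 : List Int)
    (hk1 : 1 ≤ k) (hkn : k ≤ n)
    (hbm0 : ∀ v, v ∈ base0 ↔ 0 ≤ v ∧ v < n ∧ v ∉ s0 ∧ v % 2 = 0)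
    (hbm1 : ∀ v, v ∈ base1 ↔ 0 ≤ v ∧ v < n ∧ v ∉ s0 ∧ v % 2 = 1)
    (hbs0 : base0.Pairwise (· < ·)) (hbs1 : base1.Pairwise (· < ·)) :
    ∀ (fuel : Nat) (sA : PvA) (sB : PvB) (L0 L1 : Nat → Bool) (t : Int),
      pvRel n s0 base0 base1 L0 L1 sA sB →
      sB.ans = sA.q.foldl (fun a v => PySem.List.pySetD a v t) sA.ans →
      pvLiveCt L0 base0.length + pvLiveCt L1 base1.length + sA.q.length < fuel →
      pvLoopA n k (base0 ++ [n]) (base1 ++ [n]) fuel sA t = pvLoopB n k fuel sB t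
  | 0, sA, sB, L0, L1, t, _, _, hfuel => by omega
  | fuel + 1, sA, sB, L0, L1, t, hR, hans, hfuel => by
    have hq := hR.1
    simp only [pvLoopA, pvLoopB]
    rw [← hq]
    by_cases hemp : sA.q.isEmpty
    · rw [if_pos hemp, if_pos hemp]
      rw [List.isEmpty_iff] at hemp
      rw [hans, hemp]
      rfl
    · rw [if_neg hemp, if_neg hemp]
      rw [List.isEmpty_iff] at hemp
      have hRmid : pvRel n s0 base0 base1 L0 L1 { sA with q := [] } { sB with q := [] } := by
        rcases hR with ⟨_, h2, h3, h4, _⟩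
        exact ⟨rfl, h2, h3, h4, by simp⟩
      have htmp : ∀ i ∈ sA.q, 0 ≤ i ∧ i < n ∧ i ∈ ({ sB with q := [] } : PvB).visited := by
        intro i hi
        exact hR.2.2.2.2 i (by rw [← hq]; exact hi)
      have hansmid : ({ sB with q := [] } : PvB).ans =
          ({ sA with q := [] } : PvA).q.foldl (fun a v => PySem.List.pySetD a v (t + 1))
            (sA.q.foldl (fun a v => PySem.List.pySetD a v t) ({ sA with q := [] } : PvA).ans) := by
        exact hans
      rcases pvLevelAB n k s0 base0 base1 hk1 hkn hbm0 hbm1 hbs0 hbs1 sA.q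
        { sA with q := [] } { sB with q := [] } L0 L1 t hRmid htmp hansmid
        with ⟨L0', L1', hRf, hansf, hcountf⟩
      have hqlen : 1 ≤ sA.q.length := by
        cases hql : sA.q with
        | nil => exact absurd hql hemp
        | cons a l => simp [hql]
      exact pvLoopAB n k s0 base0 base1 hk1 hkn hbm0 hbm1 hbs0 hbs1 fuel
        (sA.q.foldl (pvProcA n k t (base0 ++ [n]) (base1 ++ [n])) { sA with q := [] })
        (sA.q.foldl (pvProcB n k (t + 1)) { sB with q := [] })
        L0' L1' (t + 1) hRf hansf (by simp at hcountf; omega)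

theorem pvNbFold (s : List Int) : ∀ (l : List Int) (acc : List Int × List Int),
    l.foldl (fun (nb : List Int × List Int) i =>
      if i ∈ s then nb
      else if PySem.Int.mod i 2 = 0 then (nb.1 ++ [i], nb.2) else (nb.1, nb.2 ++ [i])) acc =
    (acc.1 ++ l.filter (fun i => decide (i ∉ s) && decide (i % 2 = 0)),
     acc.2 ++ l.filter (fun i => decide (i ∉ s) && !decide (i % 2 = 0)))
  | [], acc => by simp
  | i :: l, acc => by
    rw [List.foldl_cons, List.filter_cons, List.filter_cons]
    by_cases hs : i ∈ s
    · rw [if_pos hs]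
      have h1 : (decide (i ∉ s) && decide (i % 2 = 0)) = false := by simp [hs]
      have h2 : (decide (i ∉ s) && !decide (i % 2 = 0)) = false := by simp [hs]
      rw [h1, h2]
      simp only [Bool.false_eq_true, if_false]
      exact pvNbFold s l acc
    · rw [if_neg hs]
      by_cases hm : PySem.Int.mod i 2 = 0
      · have hm' : i % 2 = 0 := by rw [← pvMod2]; exact hm
        rw [if_pos hm]
        have h1 : (decide (i ∉ s) && decide (i % 2 = 0)) = true := by simp [hs, hm']
        have h2 : (decide (i ∉ s) && !decide (i % 2 = 0)) = false := by simp [hs, hm']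
        rw [h1, h2]
        simp only [if_true, Bool.false_eq_true, if_false]
        rw [pvNbFold s l (acc.1 ++ [i], acc.2)]
        simp
      · have hm' : ¬ i % 2 = 0 := by rw [← pvMod2]; exact hm
        rw [if_neg hm]
        have h1 : (decide (i ∉ s) && decide (i % 2 = 0)) = false := by simp [hs, hm']
        have h2 : (decide (i ∉ s) && !decide (i % 2 = 0)) = true := by simp [hs, hm']
        rw [h1, h2]
        simp only [if_true, Bool.false_eq_true, if_false]
        rw [pvNbFold s l (acc.1, acc.2 ++ [i])]
        simp

theorem pvInitGetD (len x : Nat) (h : x < len) :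
    ((List.range len).map (Int.ofNat ·)).getD x 0 = (x : Int) := by
  rw [pvGetD_eq_getElem _ _ _ (by simpa using h)]
  simp

theorem pvInitInv (nv : Int) (base : List Int) :
    InvUF (base ++ [nv]) ((List.range (base ++ [nv]).length).map (Int.ofNat ·))
      (fun _ => true) := by
  refine ⟨by simp, by simp, rfl, ?_⟩
  intro x hx
  rw [pvInitGetD _ x hx]
  refine ⟨le_refl _, ?_, fun _ => rfl⟩
  have hself := pvNxt_self (fun _ => true) base.length x (by simp at hx; omega) rfl
  simp [hself]

theorem pvDeadValTrue (a : List Int) (v : Int) : ¬ pvDeadVal a (fun _ => true) v := by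
  rintro ⟨idx, _, h, _⟩
  exact absurd h (by simp)

theorem pvLiveCtTrue (last : Nat) : pvLiveCt (fun _ => true) last = last := by
  unfold pvLiveCt; simp

theorem pvNxtBl_ge (a : List Int) (nv mn : Int) (L : Nat → Bool)
    (hmono : ∀ i j : Nat, i < j → j < a.length → a.getD i 0 < a.getD j 0)
    (hn : a.getD (a.length - 1) 0 = nv) (hlen : 1 ≤ a.length)
    (hmn : mn ≤ nv) :
    mn ≤ a.getD (pvNxt L (a.length - 1) (pvBisectLeft a mn)) 0 := by
  have hblle := pvBisectLeft_le a nv mn hlen hn hmn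
  have hge := pvNxt_ge L (a.length - 1) (pvBisectLeft a mn) hblle
  have hle := pvNxt_le L (a.length - 1) (pvBisectLeft a mn)
  rcases Nat.eq_or_lt_of_le hge with h | h
  · rw [← h]; exact pvBisectLeft_upper a mn (by omega)
  · have h1 := pvBisectLeft_upper a mn (by omega)
    have h2 := hmono _ _ h (by omega)
    omega

-- on a degenerate input the window is empty: A only writes ans[i] and collects nothing
theorem pvProcADegen (n k t : Int) (base0 base1 : List Int) (L0 L1 : Nat → Bool)
    (fa0i fa1i ans0 q0 : List Int)
    (hbs0 : base0.Pairwise (· < ·)) (hbs1 : base1.Pairwise (· < ·))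
    (hblt0 : ∀ v ∈ base0, v < n) (hblt1 : ∀ v ∈ base1, v < n)
    (hI0 : InvUF (base0 ++ [n]) fa0i L0) (hI1 : InvUF (base1 ++ [n]) fa1i L1)
    (i : Int)
    (hmxmn : min (i + k - 1) (n * 2 - k - i - 1) < max (i - k + 1) (k - i - 1))
    (hmnn : max (i - k + 1) (k - i - 1) ≤ n) :
    ∃ fa0' fa1', pvProcA n k t (base0 ++ [n]) (base1 ++ [n]) ⟨fa0i, fa1i, ans0, q0⟩ i =
      ⟨fa0', fa1', PySem.List.pySetD ans0 i t, q0⟩ := by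
  obtain ⟨hmono0, hlast0⟩ := pvBaseFacts n base0 hbs0 hblt0
  obtain ⟨hmono1, hlast1⟩ := pvBaseFacts n base1 hbs1 hblt1
  simp only [pvProcA]
  by_cases hm : PySem.Int.mod (max (i - k + 1) (k - i - 1)) 2 = 0
  · rw [if_pos hm]
    rcases hI0 with ⟨hfalen, hpos, hlastL, hrest⟩
    have hF := pvFind_spec (base0 ++ [n]) L0 fa0i.length fa0i
      (pvBisectLeft (base0 ++ [n]) (max (i - k + 1) (k - i - 1)))
      ⟨hfalen, hpos, hlastL, hrest⟩
      (pvBisectLeft_le (base0 ++ [n]) n _ hpos hlast0 hmnn) (by omega)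
    rcases hF with ⟨hF2, _⟩
    have hgt : ¬ (base0 ++ [n]).getD (pvNxt L0 ((base0 ++ [n]).length - 1)
        (pvBisectLeft (base0 ++ [n]) (max (i - k + 1) (k - i - 1)))) 0 ≤
        min (i + k - 1) (n * 2 - k - i - 1) := by
      have := pvNxtBl_ge (base0 ++ [n]) n (max (i - k + 1) (k - i - 1)) L0 hmono0 hlast0 hpos hmnn
      omega
    obtain ⟨fu2, hfu2⟩ : ∃ fu2, (base0 ++ [n]).length = fu2 + 1 :=
      ⟨(base0 ++ [n]).length - 1, by omega⟩
    have hinner : pvInner (base0 ++ [n]) (min (i + k - 1) (n * 2 - k - i - 1))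
        (pvFind fa0i (pvBisectLeft (base0 ++ [n]) (max (i - k + 1) (k - i - 1))) fa0i.length).1
        (pvFind fa0i (pvBisectLeft (base0 ++ [n]) (max (i - k + 1) (k - i - 1))) fa0i.length).2
        q0 (base0 ++ [n]).length =
        ((pvFind fa0i (pvBisectLeft (base0 ++ [n]) (max (i - k + 1) (k - i - 1)))
          fa0i.length).1, q0) := by
      rw [hF2, hfu2]
      rw [hfu2, Nat.add_sub_cancel] at hgt
      simp only [pvInner, Nat.add_sub_cancel]
      rw [if_neg hgt]
    rw [hinner]
    exact ⟨_, _, rfl⟩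
  · rw [if_neg hm]
    rcases hI1 with ⟨hfalen, hpos, hlastL, hrest⟩
    have hF := pvFind_spec (base1 ++ [n]) L1 fa1i.length fa1i
      (pvBisectLeft (base1 ++ [n]) (max (i - k + 1) (k - i - 1)))
      ⟨hfalen, hpos, hlastL, hrest⟩
      (pvBisectLeft_le (base1 ++ [n]) n _ hpos hlast1 hmnn) (by omega)
    rcases hF with ⟨hF2, _⟩
    have hgt : ¬ (base1 ++ [n]).getD (pvNxt L1 ((base1 ++ [n]).length - 1)
        (pvBisectLeft (base1 ++ [n]) (max (i - k + 1) (k - i - 1)))) 0 ≤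
        min (i + k - 1) (n * 2 - k - i - 1) := by
      have := pvNxtBl_ge (base1 ++ [n]) n (max (i - k + 1) (k - i - 1)) L1 hmono1 hlast1 hpos hmnn
      omega
    obtain ⟨fu2, hfu2⟩ : ∃ fu2, (base1 ++ [n]).length = fu2 + 1 :=
      ⟨(base1 ++ [n]).length - 1, by omega⟩
    have hinner : pvInner (base1 ++ [n]) (min (i + k - 1) (n * 2 - k - i - 1))
        (pvFind fa1i (pvBisectLeft (base1 ++ [n]) (max (i - k + 1) (k - i - 1))) fa1i.length).1
        (pvFind fa1i (pvBisectLeft (base1 ++ [n]) (max (i - k + 1) (k - i - 1))) fa1i.length).2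
        q0 (base1 ++ [n]).length =
        ((pvFind fa1i (pvBisectLeft (base1 ++ [n]) (max (i - k + 1) (k - i - 1)))
          fa1i.length).1, q0) := by
      rw [hF2, hfu2]
      rw [hfu2, Nat.add_sub_cancel] at hgt
      simp only [pvInner, Nat.add_sub_cancel]
      rw [if_neg hgt]
    rw [hinner]
    exact ⟨_, _, rfl⟩

theorem pvDegenLoopA (n k p : Int) (a0 a1 fa0i fa1i ans0 fa0' fa1' : List Int) (fu : Nat)
    (hstep : pvProcA n k 0 a0 a1 ⟨fa0i, fa1i, ans0, []⟩ p =
      ⟨fa0', fa1', PySem.List.pySetD ans0 p 0, []⟩) :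
    pvLoopA n k a0 a1 (fu + 1 + 1) ⟨fa0i, fa1i, ans0, [p]⟩ 0 =
      PySem.List.pySetD ans0 p 0 := by
  have h1 : pvLoopA n k a0 a1 (fu + 1 + 1) ⟨fa0i, fa1i, ans0, [p]⟩ 0 =
      pvLoopA n k a0 a1 (fu + 1)
        (pvProcA n k 0 a0 a1 ⟨fa0i, fa1i, ans0, []⟩ p) 1 := rfl
  rw [h1, hstep]
  rfl

theorem pvDegenLoopB (n k p : Int) (visited ans0 : List Int) (fu : Nat)
    (hstep : pvProcB n k 1 ⟨visited, ans0, []⟩ p = ⟨visited, ans0, []⟩) :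
    pvLoopB n k (fu + 1 + 1) ⟨visited, ans0, [p]⟩ 0 = ans0 := by
  have h1 : pvLoopB n k (fu + 1 + 1) ⟨visited, ans0, [p]⟩ 0 =
      pvLoopB n k (fu + 1) (pvProcB n k (0 + 1) ⟨visited, ans0, []⟩ p) 1 := rfl
  rw [h1]
  have h2 : (0 : Int) + 1 = 1 := rfl
  rw [h2, hstep]
  rfl
-- ===== VERDICT (by name: the statement is the Claim_ definition above) =====
theorem minReverseOperations_spec : Claim_equal_minReverseOperations := by
  intro n p banned k hDom hPre
  unfold Spec_minReverseOperations
  obtain ⟨hn1, hpmn, hpn, hmnle⟩ := hPre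
  simp only [minReverseOperations, minReverseOperations_alt]
  rw [pvNbFold]
  simp only [List.nil_append]
  have hS : ∀ v : Int, v ∈ PySem.Set.add (PySem.Set.ofList banned) p ↔ v ∈ banned ∨ v = p := by
    intro v
    rw [PySem.Set.mem_add, PySem.Set.mem_ofList]
  have hpS : p ∈ PySem.Set.add (PySem.Set.ofList banned) p := (hS p).2 (Or.inr rfl)
  have hbm0 : ∀ v : Int, v ∈ (PySem.List.pyRange 0 n 1).filter
      (fun i => decide (i ∉ PySem.Set.add (PySem.Set.ofList banned) p) && decide (i % 2 = 0)) ↔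
      0 ≤ v ∧ v < n ∧ v ∉ PySem.Set.add (PySem.Set.ofList banned) p ∧ v % 2 = 0 := by
    intro v
    rw [List.mem_filter, PySem.List.mem_pyRange_one]
    simp only [Bool.and_eq_true, decide_eq_true_eq]
    tauto
  have hbm1 : ∀ v : Int, v ∈ (PySem.List.pyRange 0 n 1).filter
      (fun i => decide (i ∉ PySem.Set.add (PySem.Set.ofList banned) p) && !decide (i % 2 = 0)) ↔
      0 ≤ v ∧ v < n ∧ v ∉ PySem.Set.add (PySem.Set.ofList banned) p ∧ v % 2 = 1 := by
    intro v
    rw [List.mem_filter, PySem.List.mem_pyRange_one]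
    simp only [Bool.and_eq_true, decide_eq_true_eq, Bool.not_eq_true', decide_eq_false_iff_not]
    constructor
    · rintro ⟨⟨h1, h2⟩, h3, h4⟩
      exact ⟨h1, h2, h3, by omega⟩
    · rintro ⟨h1, h2, h3, h4⟩
      exact ⟨⟨h1, h2⟩, h3, by omega⟩
  have hbs0 := (PySem.List.pairwise_lt_pyRange_one 0 n).filter
    (fun i => decide (i ∉ PySem.Set.add (PySem.Set.ofList banned) p) && decide (i % 2 = 0))
  have hbs1 := (PySem.List.pairwise_lt_pyRange_one 0 n).filter
    (fun i => decide (i ∉ PySem.Set.add (PySem.Set.ofList banned) p) && !decide (i % 2 = 0))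
  by_cases hmain : 0 ≤ p ∧ 1 ≤ k ∧ k ≤ n
  case pos =>
    obtain ⟨hp0, hk1, hkn⟩ := hmain
    have hcount : ((PySem.List.pyRange 0 n 1).filter
          (fun i => decide (i ∉ PySem.Set.add (PySem.Set.ofList banned) p) &&
            decide (i % 2 = 0))).length +
        ((PySem.List.pyRange 0 n 1).filter
          (fun i => decide (i ∉ PySem.Set.add (PySem.Set.ofList banned) p) &&
            !decide (i % 2 = 0))).length < n.toNat := by
      have e1 : ∀ (P : Int → Bool), ((PySem.List.pyRange 0 n 1).filter P).length =
          (PySem.List.pyRange 0 n 1).countP P := fun P => List.countP_eq_length_filter.symm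
      rw [e1, e1]
      have hsplit := pvCountPSplit
        (fun i => decide (i ∉ PySem.Set.add (PySem.Set.ofList banned) p))
        (fun i => decide (i ∉ PySem.Set.add (PySem.Set.ofList banned) p) && decide (i % 2 = 0))
        (fun i => decide (i ∉ PySem.Set.add (PySem.Set.ofList banned) p) && !decide (i % 2 = 0))
        (PySem.List.pyRange 0 n 1) ?_
      · rw [← hsplit]
        have hle := List.countP_le_length
          (p := fun i => decide (i ∉ PySem.Set.add (PySem.Set.ofList banned) p))
          (l := PySem.List.pyRange 0 n 1)
        have hlen : (PySem.List.pyRange 0 n 1).length = n.toNat := by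
          rw [PySem.List.length_pyRange_one]
          simp
        rcases Nat.lt_or_ge ((PySem.List.pyRange 0 n 1).countP
          (fun i => decide (i ∉ PySem.Set.add (PySem.Set.ofList banned) p))) n.toNat with h | h
        · exact h
        · exfalso
          have heq : (PySem.List.pyRange 0 n 1).countP
              (fun i => decide (i ∉ PySem.Set.add (PySem.Set.ofList banned) p)) =
              (PySem.List.pyRange 0 n 1).length := by omega
          have := List.countP_eq_length.1 heq p (by
            rw [PySem.List.mem_pyRange_one]; omega)
          rw [decide_eq_true_eq] at this
          exact this hpS
      · intro z _
        have hb : ∀ (b c : Bool), b = (b && c || b && !c) ∧ ¬((b && c) = true ∧ (b && !c) = true) := by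
          decide
        exact hb _ _
    refine pvLoopAB n k (PySem.Set.add (PySem.Set.ofList banned) p) _ _ hk1 hkn hbm0 hbm1 hbs0 hbs1
      (n.toNat + 1) _ _ (fun _ => true) (fun _ => true) 0 ?_ rfl ?_
    · refine ⟨rfl, pvInitInv n _, pvInitInv n _, ?_, ?_⟩
      · intro v
        constructor
        · exact fun h => Or.inl h
        · rintro (h | h | h)
          · exact h
          · exact absurd h (pvDeadValTrue _ _)
          · exact absurd h (pvDeadValTrue _ _)
      · intro v hv
        rcases List.mem_cons.1 hv with hv | hv
        · rw [hv]; exact ⟨hp0, hpn, hpS⟩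
        · simp at hv
    · rw [pvLiveCtTrue, pvLiveCtTrue]
      simp only [List.length_cons, List.length_nil]
      omega

  case neg =>
    have hmxmn : min (p + k - 1) (n * 2 - k - p - 1) < max (p - k + 1) (k - p - 1) := by
      have a1 := le_max_left (p - k + 1) (k - p - 1)
      have a2 := le_max_right (p - k + 1) (k - p - 1)
      have a3 := min_le_left (p + k - 1) (n * 2 - k - p - 1)
      have a4 := min_le_right (p + k - 1) (n * 2 - k - p - 1)
      omega
    obtain ⟨fu, hfu⟩ : ∃ fu, n.toNat + 1 = fu + 1 + 1 := ⟨n.toNat - 1, by omega⟩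
    rw [hfu]
    have hdeg0 := pvProcADegen n k 0 _ _ (fun _ => true) (fun _ => true)
      ((List.range (((PySem.List.pyRange 0 n 1).filter
          (fun i => decide (i ∉ PySem.Set.add (PySem.Set.ofList banned) p) &&
            decide (i % 2 = 0)) ++ [n]).length)).map (Int.ofNat ·))
      ((List.range (((PySem.List.pyRange 0 n 1).filter
          (fun i => decide (i ∉ PySem.Set.add (PySem.Set.ofList banned) p) &&
            !decide (i % 2 = 0)) ++ [n]).length)).map (Int.ofNat ·))
      (List.replicate n.toNat (-1)) ([] : List Int) hbs0 hbs1
      (fun v hv => ((hbm0 v).1 hv).2.1) (fun v hv => ((hbm1 v).1 hv).2.1)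
      (pvInitInv n _) (pvInitInv n _) p hmxmn hmnle
    rcases hdeg0 with ⟨fa0', fa1', hproc⟩
    have hrange : PySem.List.pyRange (max (p - k + 1) (k - p - 1))
        (min (p + k - 1) (2 * n - k - p - 1) + 1) 2 = [] := by
      rw [PySem.List.pyRange_of_pos _ _ (by norm_num : (0:Int) < 2)]
      rw [if_neg (by omega)]
      simp
    have hprocB : pvProcB n k 1
        ⟨PySem.Set.add (PySem.Set.ofList banned) p,
         PySem.List.pySetD (List.replicate n.toNat (-1)) p 0, ([] : List Int)⟩ p =
        ⟨PySem.Set.add (PySem.Set.ofList banned) p,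
         PySem.List.pySetD (List.replicate n.toNat (-1)) p 0, ([] : List Int)⟩ := by
      simp only [pvProcB]
      rw [hrange]
      rfl
    rw [pvDegenLoopA n k p _ _ _ _ _ fa0' fa1' fu hproc,
        pvDegenLoopB n k p _ _ fu hprocB]
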